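-- pv_equiv track=rewrite | github.com/daniel-reich/turbo-robot | tY5fmSbk85N8digXQ_10.py | ones_infection
-- ===== SOURCE A (Python) =====
-- def ones_infection(arr):
--     rows = []
--     cols = []
--
--
--     for x in range(len(arr)):
--         for y in range(len(arr[x])):
--             if arr[x][y]:
--                 rows.append(x)
--                 cols.append(y)
--
--     for x in rows:
--         arr[x] = [1] * len(arr[x])
--
--     for x in cols:
--         for y in range(len(arr)):
--             arr[y][x] = 1
--
--
--     return arr
-- ===== SOURCE B (Python) =====
-- def ones_infection(arr):
--     # Flag-vector decomposition: compute row/column flags first, then one write pass.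
--     row_has = [any(row) for row in arr]
--     width = max((len(row) for row in arr), default=0)
--     col_has = [any(row[j] for row in arr if j < len(row)) for j in range(width)]
--     for i, row in enumerate(arr):
--         for j in range(len(row)):
--             if row_has[i] or col_has[j]:
--                 row[j] = 1
--     return arr
-- ===== Notes on version B (the rewrite author's own statement) =====
-- stated objective: faster
-- what changed: Instead of recording a row/column index per nonzero cell and re-filling that whole row/column once per nonzero cell (duplicates included), B computes two boolean flag vectors (row_has/col_has) in one read pass and then does a single write pass setting a cell to 1 iff its row or column flag is set.
import Mathlib
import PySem

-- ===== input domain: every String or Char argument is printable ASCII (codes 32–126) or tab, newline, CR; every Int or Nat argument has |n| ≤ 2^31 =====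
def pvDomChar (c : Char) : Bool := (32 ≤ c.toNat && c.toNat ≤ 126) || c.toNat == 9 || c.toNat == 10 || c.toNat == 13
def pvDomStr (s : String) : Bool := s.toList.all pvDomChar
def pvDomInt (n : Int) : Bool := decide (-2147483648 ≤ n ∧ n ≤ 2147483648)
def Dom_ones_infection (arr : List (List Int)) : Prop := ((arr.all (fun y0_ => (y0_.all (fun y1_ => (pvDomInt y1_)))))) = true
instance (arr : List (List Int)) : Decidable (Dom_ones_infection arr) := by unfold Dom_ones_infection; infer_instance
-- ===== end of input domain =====

-- B replaces A's per-nonzero-cell row/column refills by two boolean flag vectors and one write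
-- pass (objective: faster). Both Pythons mutate `arr` in place; the equivalence proved here is
-- about the RETURN value (B writes single cells where A also rebinds whole row objects).

-- ===== PORT A =====
-- Loop indices of `range(len(...))` are in-range throughout A's first two loops, so they are
-- ported as Nat counters (List.range) with `List.getD`; the only write Python can raise on is
-- `arr[y][x] = 1` in the column pass, ported with `List.set` (a no-op out of range where Python
-- raises IndexError) — exactly those inputs are excluded by Pre_ones_infection.
def pvCollect (arr : List (List Int)) : List Nat × List Nat :=
  (List.range arr.length).foldl (fun rc x =>
    (List.range (arr.getD x []).length).foldl (fun rc y =>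
      if (arr.getD x []).getD y 0 ≠ 0 then (rc.1 ++ [x], rc.2 ++ [y]) else rc) rc) ([], [])

def pvRowPass (rows : List Nat) (a : List (List Int)) : List (List Int) :=
  rows.foldl (fun a x => a.set x (List.replicate (a.getD x []).length 1)) a

def pvColPass (cols : List Nat) (a : List (List Int)) : List (List Int) :=
  cols.foldl (fun a x =>
    (List.range a.length).foldl (fun a y => a.set y ((a.getD y []).set x 1)) a) a

def ones_infection (arr : List (List Int)) : List (List Int) :=
  pvColPass (pvCollect arr).2 (pvRowPass (pvCollect arr).1 arr)

-- ===== PORT B =====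
-- python: `for i, row in enumerate(arr)` is ported with List.zipIdx (Nat index).
def ones_infection_alt (arr : List (List Int)) : List (List Int) :=
  let rowHas : List Bool := arr.map (fun row => row.any (fun v => v ≠ 0))
  let width : Nat := (arr.map (fun row => row.length)).foldl max 0
  let colHas : List Bool := (List.range width).map (fun j =>
    (arr.filter (fun row => decide (j < row.length))).any (fun row => row.getD j 0 ≠ 0))
  (arr.zipIdx).map (fun p =>
    (List.range p.1.length).foldl (fun row j =>
      if rowHas.getD p.2 false || colHas.getD j false then row.set j 1 else row) p.1)

-- ===== PRECONDITION & SPEC =====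
-- Pre_ excludes exactly the inputs on which Python A raises IndexError: ragged grids where some
-- nonzero cell sits in a column that reaches past the end of a shorter row (A fills that whole
-- column through every row). On every input where A returns, Pre_ holds.
def Pre_ones_infection (arr : List (List Int)) : Prop :=
  ∀ row ∈ arr, ∀ j ∈ List.range row.length, row.getD j 0 ≠ 0 → ∀ row2 ∈ arr, j < row2.length
instance (arr : List (List Int)) : Decidable (Pre_ones_infection arr) := by
  unfold Pre_ones_infection; infer_instance
def pvWitness_ones_infection : List (List Int) := [[1, 0], [0, 0]]

def Spec_ones_infection (arr : List (List Int)) (out : List (List Int)) : Prop :=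
  out = ones_infection_alt arr
instance (arr : List (List Int)) (out : List (List Int)) : Decidable (Spec_ones_infection arr out) := by
  unfold Spec_ones_infection; infer_instance

-- ===== CLAIM (what is proved, stated in full; the proofs are below) =====
def Claim_equal_ones_infection : Prop :=
  ∀ (arr : List (List Int)), Dom_ones_infection arr → Pre_ones_infection arr →
    Spec_ones_infection arr (ones_infection arr)

-- ===== LEMMAS AND PROOFS =====

-- the nonzero-column indices of one row
def pvFilt (arr : List (List Int)) (x : Nat) : List Nat :=
  (List.range (arr.getD x []).length).filter (fun y => decide ((arr.getD x []).getD y 0 ≠ 0))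

-- generic shape of A's collection loop
theorem pv_foldl_pairs_append {β : Type} (A B : β → List Nat) :
    ∀ (l : List β) (rc : List Nat × List Nat),
      l.foldl (fun rc x => (rc.1 ++ A x, rc.2 ++ B x)) rc
        = (rc.1 ++ l.flatMap A, rc.2 ++ l.flatMap B) := by
  intro l
  induction l with
  | nil => intro rc; simp
  | cons x l ih => intro rc; simp [ih]

theorem pvCollect_inner (row : List Int) (x : Nat) (rc : List Nat × List Nat) :
    (List.range row.length).foldl (fun rc y =>
        if row.getD y 0 ≠ 0 then (rc.1 ++ [x], rc.2 ++ [y]) else rc) rc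
      = (rc.1 ++ ((List.range row.length).filter (fun y => decide (row.getD y 0 ≠ 0))).map (fun _ => x),
         rc.2 ++ (List.range row.length).filter (fun y => decide (row.getD y 0 ≠ 0))) := by
  generalize List.range row.length = l
  induction l generalizing rc with
  | nil => simp
  | cons y l ih =>
    rw [List.foldl_cons]
    by_cases h : row.getD y 0 = 0
    · have hf : List.filter (fun y => decide (row.getD y 0 ≠ 0)) (y :: l)
          = List.filter (fun y => decide (row.getD y 0 ≠ 0)) l := by
        rw [List.filter_cons, if_neg (by simp only [decide_eq_true_eq]; exact fun hc => hc h)]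
      rw [if_neg (fun hc => hc h), ih, hf]
    · have hf : List.filter (fun y => decide (row.getD y 0 ≠ 0)) (y :: l)
          = y :: List.filter (fun y => decide (row.getD y 0 ≠ 0)) l := by
        rw [List.filter_cons, if_pos (by simp only [decide_eq_true_eq]; exact h)]
      rw [if_pos h, ih, hf]
      simp

theorem pvCollect_eq (arr : List (List Int)) :
    pvCollect arr = ((List.range arr.length).flatMap (fun x => (pvFilt arr x).map (fun _ => x)),
                     (List.range arr.length).flatMap (pvFilt arr)) := by
  unfold pvCollect
  have hstep : (fun (rc : List Nat × List Nat) (x : Nat) =>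
      (List.range (arr.getD x []).length).foldl (fun rc y =>
        if (arr.getD x []).getD y 0 ≠ 0 then (rc.1 ++ [x], rc.2 ++ [y]) else rc) rc)
      = fun rc x => (rc.1 ++ (pvFilt arr x).map (fun _ => x), rc.2 ++ pvFilt arr x) := by
    funext rc x
    exact pvCollect_inner (arr.getD x []) x rc
  rw [hstep, pv_foldl_pairs_append]
  simp

theorem pv_mem_rows (arr : List (List Int)) (i : Nat) :
    i ∈ (pvCollect arr).1 ↔ i < arr.length ∧ (arr.getD i []).any (fun v => v ≠ 0) = true := by
  rw [pvCollect_eq]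
  simp only [List.mem_flatMap, List.mem_map, List.mem_range]
  constructor
  · rintro ⟨x, hx, y, hy, rfl⟩
    refine ⟨hx, ?_⟩
    simp only [pvFilt, List.mem_filter, List.mem_range, decide_eq_true_eq] at hy
    rcases hy with ⟨hlt, hne⟩
    simp only [List.any_eq_true, decide_eq_true_eq]
    refine ⟨(arr.getD x []).getD y 0, ?_, hne⟩
    rw [List.getD_eq_getElem _ _ hlt]
    exact List.getElem_mem hlt
  · rintro ⟨hi, hany⟩
    simp only [List.any_eq_true, decide_eq_true_eq] at hany
    rcases hany with ⟨v, hv, hne⟩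
    rcases List.mem_iff_getElem.mp hv with ⟨j, hj, rfl⟩
    refine ⟨i, hi, j, ?_, rfl⟩
    simp only [pvFilt, List.mem_filter, List.mem_range, decide_eq_true_eq]
    exact ⟨hj, by rwa [List.getD_eq_getElem _ _ hj]⟩

theorem pv_mem_cols (arr : List (List Int)) (j : Nat) :
    j ∈ (pvCollect arr).2 ↔ ∃ row ∈ arr, row.getD j 0 ≠ 0 := by
  rw [pvCollect_eq]
  simp only [List.mem_flatMap, List.mem_range]
  constructor
  · rintro ⟨x, hx, hy⟩
    simp only [pvFilt, List.mem_filter, List.mem_range, decide_eq_true_eq] at hy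
    refine ⟨arr.getD x [], ?_, hy.2⟩
    rw [List.getD_eq_getElem _ _ hx]
    exact List.getElem_mem hx
  · rintro ⟨row, hrow, hne⟩
    rcases List.mem_iff_getElem.mp hrow with ⟨x, hx, rfl⟩
    have hlt : j < (arr[x]).length := by
      by_contra h
      exact hne (List.getD_eq_default _ _ (by omega))
    refine ⟨x, hx, ?_⟩
    simp only [pvFilt, List.mem_filter, List.mem_range, decide_eq_true_eq,
      List.getD_eq_getElem arr _ hx]
    exact ⟨hlt, hne⟩

-- row pass characterisation
theorem pvRowPass_length (rows : List Nat) (a : List (List Int)) :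
    (pvRowPass rows a).length = a.length := by
  induction rows generalizing a with
  | nil => rfl
  | cons x rows ih =>
    rw [pvRowPass, List.foldl_cons]
    exact (ih (a.set x (List.replicate (a.getD x []).length 1))).trans (by simp)

theorem pvRowPass_getElem (rows : List Nat) (a : List (List Int)) (i : Nat) (hi : i < a.length)
    (hi' : i < (pvRowPass rows a).length) :
    (pvRowPass rows a)[i]
      = if i ∈ rows then List.replicate (a[i]).length 1 else a[i] := by
  induction rows generalizing a with
  | nil => simp [pvRowPass]
  | cons x rows ih =>
    have hset : i < (a.set x (List.replicate (a.getD x []).length 1)).length := by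
      simpa using hi
    have h2 : i < (pvRowPass rows (a.set x (List.replicate (a.getD x []).length 1))).length := by
      rw [pvRowPass_length]; exact hset
    have hih := ih (a.set x (List.replicate (a.getD x []).length 1)) hset h2
    simp only [pvRowPass, List.foldl_cons] at hih ⊢
    rw [hih]
    rcases eq_or_ne x i with rfl | hx
    · have hge : (a.set x (List.replicate (a.getD x []).length 1))[x]'hset
          = List.replicate (a.getD x []).length 1 := by
        simp
      rw [hge, List.getD_eq_getElem a _ hi]
      have hmem : x ∈ x :: rows := List.mem_cons_self
      rw [if_pos hmem]
      split_ifs <;> simp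
    · have hge : (a.set x (List.replicate (a.getD x []).length 1))[i]'hset = a[i] := by
        simp [hx]
      rw [hge]
      have hmem : (i ∈ x :: rows) ↔ (i ∈ rows) := by
        constructor
        · intro h
          rcases List.mem_cons.mp h with h1 | h1
          · exact absurd h1.symm hx
          · exact h1
        · exact fun h => List.mem_cons_of_mem _ h
      by_cases hr : i ∈ rows
      · rw [if_pos hr, if_pos (hmem.mpr hr)]
      · rw [if_neg hr, if_neg (fun hc => hr (hmem.mp hc))]

-- generic conditional set-fold (covers A's per-row column writes with c ≡ true and B's write pass)
theorem pv_setfold_length (c : Nat → Bool) (l : List Nat) (r : List Int) :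
    (l.foldl (fun r x => if c x then r.set x 1 else r) r).length = r.length := by
  induction l generalizing r with
  | nil => rfl
  | cons x l ih =>
    by_cases h : c x <;> simp [h, ih]

theorem pv_setfold_getElem (c : Nat → Bool) (l : List Nat) (r : List Int) (j : Nat)
    (hj : j < r.length)
    (hj' : j < (l.foldl (fun r x => if c x then r.set x 1 else r) r).length) :
    (l.foldl (fun r x => if c x then r.set x 1 else r) r)[j]
      = if j ∈ l ∧ c j then 1 else r[j] := by
  induction l generalizing r with
  | nil => simp
  | cons x l ih =>
    have hstep : j < (if c x then r.set x 1 else r).length := by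
      by_cases h : c x <;> simp [h, hj]
    have := ih (if c x then r.set x 1 else r) hstep
      (by simpa [pv_setfold_length] using hj')
    simp only [List.foldl_cons] at this ⊢
    rw [this]
    by_cases hx : x = j
    · subst hx
      by_cases hc : c x <;> simp [hc, List.mem_cons]
    · have hjx : ¬ j = x := fun h => hx h.symm
      by_cases hc : c x <;> simp [hc, hx, List.mem_cons, hjx]

-- A's column-pass inner loop over `range(len(arr))` maps a function over all rows
theorem pv_range_set_map (g : List Int → List Int) :
    ∀ (n : Nat) (a : List (List Int)), n ≤ a.length →
      (List.range n).foldl (fun a y => a.set y (g (a.getD y []))) a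
        = (a.take n).map g ++ a.drop n := by
  intro n
  induction n with
  | zero => intro a _; simp
  | succ n ih =>
    intro a hn
    have hn' : n < a.length := by omega
    rw [List.range_succ, List.foldl_append, ih a (by omega)]
    have hlen : ((a.take n).map g).length = n := by
      simp [Nat.min_eq_left (le_of_lt hn')]
    have hdrop : a.drop n = a[n] :: a.drop (n + 1) := List.drop_eq_getElem_cons hn'
    have hget : ((a.take n).map g ++ a.drop n).getD n [] = a[n] := by
      rw [List.getD_eq_getElem _ _ (by rw [List.length_append, hlen]; simp; omega)]
      rw [List.getElem_append_right (by omega)]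
      simp only [hlen, Nat.sub_self]
      simp only [hdrop, List.getElem_cons_zero]
    simp only [List.foldl_cons, List.foldl_nil]
    rw [hget]
    rw [List.set_append, hlen]
    simp only [Nat.sub_self, if_neg (lt_irrefl n)]
    rw [hdrop]
    simp only [List.set_cons_zero]
    rw [List.take_add_one, List.getElem?_eq_getElem hn']
    simp only [Option.toList_some, List.map_append, List.map_cons, List.map_nil, List.map_take]
    simp

theorem pvColPass_eq (cols : List Nat) (a : List (List Int)) :
    pvColPass cols a = a.map (fun r => cols.foldl (fun r x => r.set x 1) r) := by
  unfold pvColPass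
  have hstep : (fun (a : List (List Int)) (x : Nat) =>
      (List.range a.length).foldl (fun a y => a.set y ((a.getD y []).set x 1)) a)
      = fun a x => a.map (fun r => r.set x 1) := by
    funext a x
    have := pv_range_set_map (fun r => r.set x 1) a.length a (le_refl _)
    simpa using this
  rw [hstep]
  induction cols generalizing a with
  | nil => simp
  | cons x cols ih =>
    simp only [List.foldl_cons]
    rw [ih (a.map _)]
    simp [List.map_map, Function.comp]

-- bridges for B's flag vectors
theorem pv_rowHas_getD (arr : List (List Int)) (i : Nat) (hi : i < arr.length) :
    (arr.map (fun row => row.any (fun v => v ≠ 0))).getD i false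
      = (arr[i]).any (fun v => v ≠ 0) := by
  rw [List.getD_eq_getElem _ _ (by simpa using hi)]
  simp

theorem pv_width_le (arr : List (List Int)) (row : List Int) (h : row ∈ arr) :
    row.length ≤ (arr.map (fun row => row.length)).foldl max 0 :=
  (PySem.List.le_foldl_max _ 0).2 _ (List.mem_map_of_mem h)

theorem pv_colHas_getD (arr : List (List Int)) (j : Nat)
    (hj : j < (arr.map (fun row => row.length)).foldl max 0) :
    ((List.range ((arr.map (fun row => row.length)).foldl max 0)).map (fun j =>
        (arr.filter (fun row => decide (j < row.length))).any (fun row => row.getD j 0 ≠ 0))).getD j false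
      = (arr.filter (fun row => decide (j < row.length))).any (fun row => row.getD j 0 ≠ 0) := by
  rw [List.getD_eq_getElem _ _ (by simpa using hj)]
  simp

-- B's column flag agrees with membership in A's cols list
theorem pv_colHas_iff (arr : List (List Int)) (j : Nat) :
    ((arr.filter (fun row => decide (j < row.length))).any (fun row => row.getD j 0 ≠ 0) = true)
      ↔ ∃ row ∈ arr, row.getD j 0 ≠ 0 := by
  simp only [List.any_eq_true, List.mem_filter, decide_eq_true_eq]
  constructor
  · rintro ⟨row, ⟨hrow, _⟩, hne⟩
    exact ⟨row, hrow, hne⟩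
  · rintro ⟨row, hrow, hne⟩
    have hlt : j < row.length := by
      by_contra h
      exact hne (List.getD_eq_default _ _ (by omega))
    exact ⟨row, ⟨hrow, hlt⟩, hne⟩

-- ===== VERDICT (by name: the statement is the Claim_ definition above) =====
theorem ones_infection_spec : Claim_equal_ones_infection := by
  intro arr _ _
  unfold Spec_ones_infection ones_infection ones_infection_alt
  rw [pvColPass_eq]
  have hAshape : (fun (r : List Int) (x : Nat) => r.set x 1)
      = (fun r x => if (fun _ : Nat => true) x then r.set x 1 else r) := by
    funext r x; simp
  apply List.ext_getElem
  · simp [pvRowPass_length]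
  intro i hL hR
  have hiarr : i < arr.length := by simpa [pvRowPass_length] using hL
  rw [List.getElem_map, List.getElem_map, List.getElem_zipIdx]
  simp only [Nat.zero_add]
  rw [pvRowPass_getElem _ _ _ hiarr (by rw [pvRowPass_length]; exact hiarr)]
  rw [hAshape]
  -- now both sides are conditional set-folds over the same source row
  apply List.ext_getElem
  · rw [pv_setfold_length, pv_setfold_length]
    split_ifs <;> simp
  intro j hjL hjR
  have hlen1 : (if i ∈ (pvCollect arr).1 then List.replicate arr[i].length 1 else arr[i]).length
      = arr[i].length := by split_ifs <;> simp
  have hj : j < arr[i].length := by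
    rw [pv_setfold_length, hlen1] at hjL; exact hjL
  rw [pv_setfold_getElem _ _ _ _ (by rw [hlen1]; exact hj) hjL,
      pv_setfold_getElem _ _ _ _ hj hjR]
  -- flag bridges
  have hrow : ((arr.map (fun row => row.any (fun v => v ≠ 0))).getD i false = true)
      ↔ i ∈ (pvCollect arr).1 := by
    rw [pv_rowHas_getD arr i hiarr, pv_mem_rows, List.getD_eq_getElem arr _ hiarr]
    simp [hiarr]
  have hjw : j < (arr.map (fun row => row.length)).foldl max 0 :=
    lt_of_lt_of_le hj (pv_width_le arr arr[i] (List.getElem_mem hiarr))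
  have hcol : (((List.range ((arr.map (fun row => row.length)).foldl max 0)).map (fun j =>
        (arr.filter (fun row => decide (j < row.length))).any (fun row => row.getD j 0 ≠ 0))).getD j false = true)
      ↔ j ∈ (pvCollect arr).2 := by
    rw [pv_colHas_getD arr j hjw, pv_colHas_iff]
    exact (pv_mem_cols arr j).symm
  have hjr : j ∈ List.range arr[i].length := List.mem_range.mpr hj
  by_cases hr : i ∈ (pvCollect arr).1 <;> by_cases hc : j ∈ (pvCollect arr).2
  · have e1 := hrow.mpr hr
    have e2 := hcol.mpr hc
    simp only [e1, e2]
    simp [hc, hjr]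
  · have e1 := hrow.mpr hr
    have e2 : ((List.range ((arr.map (fun row => row.length)).foldl max 0)).map (fun j =>
        (arr.filter (fun row => decide (j < row.length))).any (fun row => row.getD j 0 ≠ 0))).getD j false = false :=
      Bool.eq_false_iff.mpr (fun h => hc (hcol.mp h))
    simp only [e1, e2]
    simp [hr, hc, hjr]
  · have e1 : (arr.map (fun row => row.any (fun v => v ≠ 0))).getD i false = false :=
      Bool.eq_false_iff.mpr (fun h => hr (hrow.mp h))
    have e2 := hcol.mpr hc
    simp only [e1, e2]
    simp [hc, hjr]
  · have e1 : (arr.map (fun row => row.any (fun v => v ≠ 0))).getD i false = false :=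
      Bool.eq_false_iff.mpr (fun h => hr (hrow.mp h))
    have e2 : ((List.range ((arr.map (fun row => row.length)).foldl max 0)).map (fun j =>
        (arr.filter (fun row => decide (j < row.length))).any (fun row => row.getD j 0 ≠ 0))).getD j false = false :=
      Bool.eq_false_iff.mpr (fun h => hc (hcol.mp h))
    simp only [e1, e2]
    simp [hr, hc, hjr]
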